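-- pv_equiv track=rewrite | github.com/sufian-sani/python-code | Python Problem/w3resource/String/52_permutations.py | all_repeat
-- ===== SOURCE A (Python) =====
-- def all_repeat(str1):
--     ls_all=[]
--     str1=list(str1)
--     for i in str1:
--         for j in str1:
--             for k in str1:
--                 ls_all.append((i,j,k))
--     return ls_all
-- ===== SOURCE B (Python) =====
-- def all_repeat(str1):
--     chars = list(str1)
--     result = [[]]
--     for _ in range(3):
--         result = [t + [c] for t in result for c in chars]
--     return [tuple(t) for t in result]
-- ===== Notes on version B (the rewrite author's own statement) =====
-- stated objective: alternative
-- what changed: Replaces three nested loops over the characters by iterative breadth-first extension: starting from [[]], three rounds each extend every partial list by one character (a comprehension/flatMap), then the length-3 lists are converted to tuples.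
import Mathlib
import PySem

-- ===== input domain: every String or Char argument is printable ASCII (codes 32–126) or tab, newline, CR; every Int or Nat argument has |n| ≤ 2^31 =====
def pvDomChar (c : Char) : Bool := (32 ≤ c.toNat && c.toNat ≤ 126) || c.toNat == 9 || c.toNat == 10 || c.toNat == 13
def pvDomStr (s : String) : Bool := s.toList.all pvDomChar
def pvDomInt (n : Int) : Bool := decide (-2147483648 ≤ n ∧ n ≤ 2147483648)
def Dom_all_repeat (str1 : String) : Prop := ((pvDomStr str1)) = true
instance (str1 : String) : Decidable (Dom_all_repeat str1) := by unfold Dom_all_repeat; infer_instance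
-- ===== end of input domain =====

-- B builds the triples by iterative breadth-first extension (three rounds of extending
-- partial lists by one character) instead of A's three nested loops; objective: alternative.

-- ===== PORT A =====
-- three nested for-loops appending (i, j, k) to an accumulator
def all_repeat (str1 : String) : List (String × String × String) :=
  let cs := str1.toList
  cs.foldl (fun acc i =>
    cs.foldl (fun acc j =>
      cs.foldl (fun acc k =>
        acc ++ [(String.ofList [i], String.ofList [j], String.ofList [k])]) acc) acc) []

-- ===== PORT B =====
-- one extension round: [t + [c] for t in ts for c in chars]
def pvExtend (chars : List String) (ts : List (List String)) : List (List String) :=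
  ts.flatMap (fun t => chars.map (fun c => t ++ [c]))

-- tuple(t) for a length-3 list (the only shape reached after three rounds)
def pvToTriple (t : List String) : String × String × String :=
  match t with
  | [a, b, c] => (a, b, c)
  | _ => ("", "", "")

def all_repeat_alt (str1 : String) : List (String × String × String) :=
  let chars := str1.toList.map (fun c => String.ofList [c])
  let result := (List.range 3).foldl (fun ts _ => pvExtend chars ts) [[]]
  result.map pvToTriple

-- ===== PRECONDITION & SPEC =====
def Spec_all_repeat (str1 : String) (out : List (String × String × String)) : Prop := out = all_repeat_alt str1
instance (str1 : String) (out : List (String × String × String)) : Decidable (Spec_all_repeat str1 out) := by unfold Spec_all_repeat; infer_instance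

-- ===== CLAIM (what is proved, stated in full; the proofs are below) =====
def Claim_equal_all_repeat : Prop := ∀ (str1 : String), Dom_all_repeat str1 → Spec_all_repeat str1 (all_repeat str1)

-- ===== LEMMAS AND PROOFS =====

theorem pv_foldl_app (cs : List Char) (f : Char → List (String × String × String))
    (acc : List (String × String × String)) :
    cs.foldl (fun a c => a ++ f c) acc = acc ++ cs.flatMap f := by
  induction cs generalizing acc with
  | nil => simp
  | cons c cs ih => simp [List.foldl, ih, List.flatMap_cons]

theorem all_repeat_eq_flatMap (str1 : String) :
    all_repeat str1 =
      str1.toList.flatMap (fun i => str1.toList.flatMap (fun j =>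
        str1.toList.map (fun k => (String.ofList [i], String.ofList [j], String.ofList [k])))) := by
  have h1 : ∀ (i j : Char) (acc : List (String × String × String)),
      str1.toList.foldl (fun acc k => acc ++ [(String.ofList [i], String.ofList [j], String.ofList [k])]) acc
        = acc ++ str1.toList.map (fun k => (String.ofList [i], String.ofList [j], String.ofList [k])) := by
    intro i j acc
    rw [pv_foldl_app str1.toList (fun k => [(String.ofList [i], String.ofList [j], String.ofList [k])]) acc]
    rw [← List.map_eq_flatMap]
  have h2 : ∀ (i : Char) (acc : List (String × String × String)),
      str1.toList.foldl (fun acc j =>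
        acc ++ str1.toList.map (fun k => (String.ofList [i], String.ofList [j], String.ofList [k]))) acc
        = acc ++ str1.toList.flatMap (fun j =>
            str1.toList.map (fun k => (String.ofList [i], String.ofList [j], String.ofList [k]))) := by
    intro i acc
    exact pv_foldl_app str1.toList _ acc
  show str1.toList.foldl _ [] = _
  simp only [h1, h2]
  rw [pv_foldl_app]
  simp

theorem all_repeat_spec_aux (str1 : String) : all_repeat str1 = all_repeat_alt str1 := by
  rw [all_repeat_eq_flatMap]
  show _ = ((List.range 3).foldl (fun ts _ => pvExtend (str1.toList.map (fun c => String.ofList [c])) ts) [[]]).map pvToTriple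
  simp [pvExtend, pvToTriple, List.range_succ, List.map_flatMap, List.map_map, List.flatMap_map,
    List.flatMap_assoc, Function.comp_def]

-- ===== VERDICT (by name: the statement is the Claim_ definition above) =====
theorem all_repeat_spec : Claim_equal_all_repeat := by
  intro str1 _
  unfold Spec_all_repeat
  exact all_repeat_spec_aux str1
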